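-- pv_equiv track=rewrite | github.com/xbr-dr/test2 | app.py | find_location_in_query
-- ===== SOURCE A (Python) =====
-- from typing import List, Dict, Optional
--
-- def find_location_in_query(query: str, locations: List[Dict]) -> Optional[Dict]:
--     """Find if query mentions any known location"""
--     if not query or not locations:
--         return None
--
--     query_lower = query.lower()
--
--     # Look for exact matches first
--     for location in locations:
--         if location['name'].lower() in query_lower:
--             return location
--
--     # Look for partial matches
--     for location in locations:
--         name_words = location['name'].lower().split()
--         for word in name_words:
--             if len(word) > 3 and word in query_lower:
--                 return location
--
--     return None
-- ===== SOURCE B (Python) =====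
-- from typing import List, Dict, Optional
--
-- def find_location_in_query(query: str, locations: List[Dict]) -> Optional[Dict]:
--     """Find if query mentions any known location (single pass, deferred partial match)"""
--     if not query or not locations:
--         return None
--     query_lower = query.lower()
--     pending = None
--     for location in locations:
--         name_lower = location['name'].lower()
--         if name_lower in query_lower:
--             return location
--         if pending is None and any(len(w) > 3 and w in query_lower for w in name_lower.split()):
--             pending = location
--     return pending
-- ===== Notes on version B (the rewrite author's own statement) =====
-- stated objective: alternative
-- what changed: Replaces A's two full passes (exact-match scan, then partial word-match scan) by a single pass that returns on an exact match and remembers the first partial match in a 'pending' variable returned only after the whole scan.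
import Mathlib
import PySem

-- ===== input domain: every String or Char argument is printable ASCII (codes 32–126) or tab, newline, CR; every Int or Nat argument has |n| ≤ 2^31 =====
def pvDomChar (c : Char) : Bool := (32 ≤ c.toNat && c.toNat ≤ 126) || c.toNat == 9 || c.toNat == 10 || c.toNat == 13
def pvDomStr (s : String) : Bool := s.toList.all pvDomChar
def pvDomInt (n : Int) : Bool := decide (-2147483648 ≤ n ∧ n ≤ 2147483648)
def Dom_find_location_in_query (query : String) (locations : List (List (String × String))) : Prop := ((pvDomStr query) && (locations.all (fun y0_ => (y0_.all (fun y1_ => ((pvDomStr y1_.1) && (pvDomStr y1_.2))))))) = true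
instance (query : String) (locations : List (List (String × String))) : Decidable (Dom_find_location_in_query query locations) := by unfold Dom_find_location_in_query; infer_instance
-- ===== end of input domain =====

-- B changes the decomposition: one pass with a deferred 'pending' partial match instead of A's two full passes; same cost.

-- ===== PORT A =====
-- location['name'] (first match in the association list; Pre_ guarantees the key is present)
def pvName (loc : List (String × String)) : String :=
  (((loc.find? (fun p => p.1 == "name")).map (·.2)).getD "")

-- first loop of A: exact matches
def pvLoopExact (ql : String) : List (List (String × String)) → Option (List (String × String))
  | [] => none
  | loc :: rest =>
      if PySem.Str.isIn (PySem.Str.lower (pvName loc)) ql then some loc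
      else pvLoopExact ql rest

-- word test of A's inner loop: len(word) > 3 and word in query_lower
def pvWordHit (ql w : String) : Bool :=
  decide (3 < PySem.Str.len w) && PySem.Str.isIn w ql

-- second loop of A: partial matches
def pvLoopPartial (ql : String) : List (List (String × String)) → Option (List (String × String))
  | [] => none
  | loc :: rest =>
      if (PySem.Str.split₀ (PySem.Str.lower (pvName loc))).any (pvWordHit ql) then some loc
      else pvLoopPartial ql rest

def find_location_in_query (query : String) (locations : List (List (String × String))) : Option (List (String × String)) :=
  if query = "" ∨ locations = [] then none
  else
    let ql := PySem.Str.lower query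
    match pvLoopExact ql locations with
    | some loc => some loc
    | none => pvLoopPartial ql locations

-- ===== PORT B =====
-- single pass: return on exact match, remember the first partial match in 'pending'
def pvScan (ql : String) (locs : List (List (String × String))) (pending : Option (List (String × String))) : Option (List (String × String)) :=
  match locs with
  | [] => pending
  | loc :: rest =>
      let nl := PySem.Str.lower (pvName loc)
      if PySem.Str.isIn nl ql then some loc
      else pvScan ql rest
        (if pending.isNone && (PySem.Str.split₀ nl).any (pvWordHit ql) then some loc else pending)

def find_location_in_query_alt (query : String) (locations : List (List (String × String))) : Option (List (String × String)) :=
  if query = "" ∨ locations = [] then none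
  else pvScan (PySem.Str.lower query) locations none

-- ===== PRECONDITION & SPEC =====
-- Pre_ excludes exactly the inputs on which Python A raises KeyError: a location without a 'name' key
-- that is not preceded by an exact-matching (named) location, with a nonempty query and location list.
def pvNamed (loc : List (String × String)) : Bool :=
  (loc.find? (fun p => p.1 == "name")).isSome
def Pre_find_location_in_query (query : String) (locations : List (List (String × String))) : Prop :=
  query = "" ∨ locations = [] ∨
  ∀ k < locations.length, pvNamed (locations.getD k []) = true ∨
    ∃ j < k, pvNamed (locations.getD j []) = true ∧
      PySem.Str.isIn (PySem.Str.lower (pvName (locations.getD j []))) (PySem.Str.lower query) = true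
instance (query : String) (locations : List (List (String × String))) : Decidable (Pre_find_location_in_query query locations) := by unfold Pre_find_location_in_query; infer_instance

def pvWitness_find_location_in_query : String × (List (List (String × String))) :=
  ("visit paris now", [[("name", "Berlin")], [("name", "Paris")]])

def Spec_find_location_in_query (query : String) (locations : List (List (String × String))) (out : Option (List (String × String))) : Prop := out = find_location_in_query_alt query locations
instance (query : String) (locations : List (List (String × String))) (out : Option (List (String × String))) : Decidable (Spec_find_location_in_query query locations out) := by unfold Spec_find_location_in_query; infer_instance

-- ===== CLAIM (what is proved, stated in full; the proofs are below) =====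
def Claim_equal_find_location_in_query : Prop := ∀ (query : String) (locations : List (List (String × String))), Dom_find_location_in_query query locations → Pre_find_location_in_query query locations → Spec_find_location_in_query query locations (find_location_in_query query locations)

-- ===== LEMMAS AND PROOFS =====

-- the single pass equals: first exact match if any, else the pending carried in, else the first partial match
theorem pvScan_eq (ql : String) (locs : List (List (String × String)))
    (pending : Option (List (String × String))) :
    pvScan ql locs pending =
      match pvLoopExact ql locs with
      | some l => some l
      | none =>
        match pending with
        | some p => some p
        | none => pvLoopPartial ql locs := by
  induction locs generalizing pending with
  | nil => cases pending <;> simp [pvScan, pvLoopExact, pvLoopPartial]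
  | cons loc rest ih =>
      simp only [pvScan, pvLoopExact, pvLoopPartial]
      by_cases hex : PySem.Str.isIn (PySem.Str.lower (pvName loc)) ql = true
      · rw [if_pos hex, if_pos hex]
      · rw [if_neg hex, if_neg hex, ih]
        cases pending with
        | some p =>
            rw [if_neg (by simp)]
        | none =>
            by_cases hp : ((PySem.Str.split₀ (PySem.Str.lower (pvName loc))).any (pvWordHit ql)) = true
            · rw [if_pos (by simp [hp]), if_pos hp]
            · rw [if_neg (by simp [hp]), if_neg hp]

-- ===== VERDICT (by name: the statement is the Claim_ definition above) =====
theorem find_location_in_query_spec : Claim_equal_find_location_in_query := by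
  intro query locations _ _
  unfold Spec_find_location_in_query find_location_in_query find_location_in_query_alt
  by_cases h : query = "" ∨ locations = []
  · simp [h]
  · rw [if_neg h, if_neg h, pvScan_eq]
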